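-- pv_equiv track=rewrite | github.com/AdenK2027/Polling-Statistics-Hub | src/write_data.py | stringToCSVList
-- ===== SOURCE A (Python) =====
-- def stringToCSVList(string):
--     temp_str = ''
--     index = 0
--     result = [[]]
--     for letter in string:
--         if letter == '|':
--             result[index].append(temp_str)
--             temp_str = ''
--         elif letter == '\n':
--             result.append([])
--             index += 1
--         else:
--             temp_str += letter
--     return result
-- ===== SOURCE B (Python) =====
-- def stringToCSVList(string):
--     # Fields end at '|' and rows end at '\n'.  A field may continue across a
--     # line break, so the unterminated last piece of each line carries over
--     # into the next line's first field; text after the final '|' is dropped.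
--     result = []
--     carry = ''
--     for line in string.split('\n'):
--         fields = (carry + line).split('|')
--         result.append(fields[:-1])
--         carry = fields[-1]
--     return result
-- ===== Notes on version B (the rewrite author's own statement) =====
-- stated objective: simpler
-- what changed: A's character-by-character state machine (pending-string accumulator plus a row index into a growing result) is replaced by two library tokenization passes: split the text into lines on the newline character, split each line into fields on the pipe character, and carry each line's unterminated last piece into the next line's first field.
import Mathlib
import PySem

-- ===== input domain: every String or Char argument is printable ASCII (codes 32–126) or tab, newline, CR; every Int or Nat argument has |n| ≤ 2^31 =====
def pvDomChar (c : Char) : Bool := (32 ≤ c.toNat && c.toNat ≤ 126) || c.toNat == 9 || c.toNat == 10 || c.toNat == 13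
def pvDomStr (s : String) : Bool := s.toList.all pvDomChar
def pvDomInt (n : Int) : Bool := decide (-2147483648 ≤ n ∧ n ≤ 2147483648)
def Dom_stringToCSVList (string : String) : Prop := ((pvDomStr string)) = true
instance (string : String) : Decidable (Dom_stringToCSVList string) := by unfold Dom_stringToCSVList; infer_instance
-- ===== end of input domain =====

-- B replaces A's character-by-character state machine by two library tokenization passes:
-- split on '\n' into lines, split each line on '|' into fields, carrying a line's
-- unterminated last piece into the next line's first field (objective: simpler).


-- ===== PORT A =====
-- one loop iteration of A; state = (temp_str, index, result).  Python's `index` is an int that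
-- stays nonnegative and in range for `result` (it starts at 0 and is bumped exactly when a row
-- is appended), so it is carried as a Nat; `result[index].append(x)` is `List.modify index (· ++ [x])`.
def pvStepA (s : String × Nat × List (List String)) (letter : Char) :
    String × Nat × List (List String) :=
  match s with
  | (temp_str, index, result) =>
    if letter = '|' then ("", index, result.modify index (fun row => row ++ [temp_str]))
    else if letter = '\n' then (temp_str, index + 1, result ++ [[]])
    else (temp_str.push letter, index, result)

def stringToCSVList (string : String) : List (List String) :=
  (string.toList.foldl pvStepA ("", 0, [[]])).2.2

-- ===== PORT B =====
-- Source B: for line in string.split('\n'): fields = (carry + line).split('|');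
--       result.append(fields[:-1]); carry = fields[-1].
-- Python's split on a single-character separator is exactly List.splitOn on the
-- characters; the loop state is (result, carry), carry kept as List Char.
def stringToCSVList_alt (string : String) : List (List String) :=
  ((string.toList.splitOn '\n').foldl
    (fun (st : List (List String) × List Char) line =>
      let fields := (st.2 ++ line).splitOn '|'
      (st.1 ++ [fields.dropLast.map String.ofList], fields.getLastD []))
    ([], [])).1

-- ===== PRECONDITION & SPEC =====
def Spec_stringToCSVList (string : String) (out : List (List String)) : Prop := out = stringToCSVList_alt string
instance (string : String) (out : List (List String)) : Decidable (Spec_stringToCSVList string out) := by unfold Spec_stringToCSVList; infer_instance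

-- ===== CLAIM (what is proved, stated in full; the proofs are below) =====
def Claim_equal_stringToCSVList : Prop := ∀ (string : String), Dom_stringToCSVList string → Spec_stringToCSVList string (stringToCSVList string)

-- ===== LEMMAS AND PROOFS =====

theorem pvDropLast_getLastD (res : List (List String)) (h : res ≠ []) :
    res.dropLast ++ [res.getLastD []] = res := by
  induction res with
  | nil => exact absurd rfl h
  | cons r rs ih =>
    cases rs with
    | nil => rfl
    | cons r' rs' => simpa using ih (by simp)

theorem pvModify_cons_succ (a : List String) (l : List (List String)) (n : Nat)
    (f : List String → List String) : (a :: l).modify (n + 1) f = a :: l.modify n f := rfl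

theorem pvModify_aux (f : List String → List String) :
    ∀ (l : List (List String)) (a : List String),
    (a :: l).modify l.length f = (a :: l).dropLast ++ [f ((a :: l).getLastD [])]
  | [], a => rfl
  | b :: l, a => by
    have ih := pvModify_aux f l b
    rw [show (b :: l).length = l.length + 1 from rfl, pvModify_cons_succ, ih]
    simp

theorem pvModify_last (res : List (List String)) (h : res ≠ []) (f : List String → List String) :
    res.modify (res.length - 1) f = res.dropLast ++ [f (res.getLastD [])] := by
  cases res with
  | nil => exact absurd rfl h
  | cons a l => simpa using pvModify_aux f l a

-- B's loop, generalized: process the remaining lines given the fields already placed in the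
-- current row (`last`) and the pending unterminated text (`carry`).
def pvBexec : List (List Char) → List String → List Char → List (List String)
  | [], _, _ => []
  | line :: rest, last, carry =>
      let segs := (carry ++ line).splitOn '|'
      (last ++ segs.dropLast.map String.ofList) :: pvBexec rest [] (segs.getLastD [])

theorem pvSplitOn_ne_nil {α : Type} [BEq α] (a : α) (l : List α) : l.splitOn a ≠ [] :=
  List.splitOnP_ne_nil _ l

theorem pvDropLast_cons_of_ne_nil {α : Type} (a : α) (l : List α) (h : l ≠ []) :
    (a :: l).dropLast = a :: l.dropLast := by
  cases l with
  | nil => exact absurd rfl h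
  | cons b t => rfl

theorem pvGetLastD_cons_of_ne_nil {α : Type} (a d : α) (l : List α) (h : l ≠ []) :
    (a :: l).getLastD d = l.getLastD d := by
  cases l with
  | nil => exact absurd rfl h
  | cons b t => simp

theorem pvSplitOn_single (temp : List Char) (h : '|' ∉ temp) :
    temp.splitOn '|' = [temp] := by
  unfold List.splitOn
  apply List.splitOnP_eq_single
  intro x hx
  simp only [beq_iff_eq]
  exact fun he => h (he ▸ hx)

theorem pvSplitOn_pipe (temp line : List Char) (h : '|' ∉ temp) :
    (temp ++ '|' :: line).splitOn '|' = temp :: line.splitOn '|' := by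
  unfold List.splitOn
  apply List.splitOnP_first
  · intro x hx
    simp only [beq_iff_eq]
    exact fun he => h (he ▸ hx)
  · simp

-- prepending '|' to the first line flushes the carry as a completed field
theorem pvBexec_pipe (line : List Char) (rest : List (List Char)) (last : List String)
    (temp : List Char) (h : '|' ∉ temp) :
    pvBexec (('|' :: line) :: rest) last temp
      = pvBexec (line :: rest) (last ++ [String.ofList temp]) [] := by
  have hne := pvSplitOn_ne_nil '|' line
  simp only [pvBexec, List.nil_append, pvSplitOn_pipe temp line h,
    pvDropLast_cons_of_ne_nil _ _ hne, pvGetLastD_cons_of_ne_nil _ _ _ hne,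
    List.map_cons, List.append_assoc, List.singleton_append]

-- prepending an ordinary character to the first line extends the carry
theorem pvBexec_char (c : Char) (line : List Char) (rest : List (List Char))
    (last : List String) (temp : List Char) :
    pvBexec ((c :: line) :: rest) last temp
      = pvBexec (line :: rest) last (temp ++ [c]) := by
  simp [pvBexec]

-- A's loop equals B's generalized loop on the remaining characters
theorem pvMain (l : List Char) : ∀ (temp : String) (res : List (List String)),
    res ≠ [] → '|' ∉ temp.toList →
    (l.foldl pvStepA (temp, res.length - 1, res)).2.2
      = res.dropLast ++ pvBexec (l.splitOn '\n') (res.getLastD []) temp.toList := by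
  induction l with
  | nil =>
    intro temp res hres htemp
    simp only [List.foldl_nil, List.splitOn_nil, pvBexec, List.append_nil,
      pvSplitOn_single temp.toList htemp]
    simpa using (pvDropLast_getLastD res hres).symm
  | cons c l ih =>
    intro temp res hres htemp
    obtain ⟨line, rest, hsplit⟩ : ∃ a b, l.splitOn '\n' = a :: b := by
      cases hx : l.splitOn '\n' with
      | nil => exact absurd hx (pvSplitOn_ne_nil _ _)
      | cons a b => exact ⟨a, b, rfl⟩
    by_cases h1 : c = '|'
    · -- flush temp_str into the current last row
      subst h1
      have hmod : res.modify (res.length - 1) (fun row => row ++ [temp])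
          = res.dropLast ++ [res.getLastD [] ++ [temp]] :=
        pvModify_last res hres _
      have hstep : pvStepA (temp, res.length - 1, res) '|'
          = ("", res.length - 1, res.dropLast ++ [res.getLastD [] ++ [temp]]) := by
        simp [pvStepA, hmod]
      have hlen : res.length - 1 = (res.dropLast ++ [res.getLastD [] ++ [temp]]).length - 1 := by
        cases res with
        | nil => exact absurd rfl hres
        | cons r rs => simp
      rw [List.foldl_cons, hstep, hlen, ih "" _ (by simp) (by simp)]
      have hcsplit : (('|' : Char) :: l).splitOn '\n' = ('|' :: line) :: rest := by
        simp [List.splitOn, List.splitOnP_cons]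
        simp [List.splitOn] at hsplit
        simp [hsplit]
      rw [hcsplit, pvBexec_pipe _ _ _ _ htemp, hsplit]
      simp
    · by_cases h2 : c = '\n'
      · -- open a fresh (empty) row
        subst h2
        have hstep : pvStepA (temp, res.length - 1, res) '\n'
            = (temp, (res ++ [[]]).length - 1, res ++ [[]]) := by
          have : 0 < res.length := List.length_pos_iff.mpr hres
          simp [pvStepA]
          omega
        rw [List.foldl_cons, hstep, ih temp _ (by simp) htemp]
        have hcsplit : (('\n' : Char) :: l).splitOn '\n' = [] :: line :: rest := by
          simp [List.splitOn, List.splitOnP_cons]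
          simp [List.splitOn] at hsplit
          simp [hsplit]
        rw [hcsplit, hsplit]
        have hb : pvBexec ([] :: line :: rest) (res.getLastD []) temp.toList
            = res.getLastD [] :: pvBexec (line :: rest) [] temp.toList := by
          simp [pvBexec, pvSplitOn_single temp.toList htemp]
        have h3 : (res ++ [[]] : List (List String)).dropLast = res := by simp
        have h4 : (res ++ [[]] : List (List String)).getLastD [] = [] := by simp
        rw [hb, h3, h4]
        conv_lhs => rw [← pvDropLast_getLastD res hres]
        simp [pvBexec]
      · -- ordinary character: push it onto temp_str
        have hstep : pvStepA (temp, res.length - 1, res) c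
            = (temp.push c, res.length - 1, res) := by
          simp [pvStepA, h1, h2]
        rw [List.foldl_cons, hstep,
          ih (temp.push c) res hres (by
            simp [String.toList_push, htemp]
            exact fun he => h1 he.symm)]
        have hcsplit : (c :: l).splitOn '\n' = (c :: line) :: rest := by
          simp [List.splitOn, List.splitOnP_cons, h2]
          simp [List.splitOn] at hsplit
          simp [hsplit]
        rw [hcsplit, hsplit, pvBexec_char]
        simp [String.toList_push]

-- B's port (a foldl with state (result, carry)) computes pvBexec
theorem pvAltFold (lines : List (List Char)) :
    ∀ (acc : List (List String)) (carry : List Char),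
    (lines.foldl
      (fun (st : List (List String) × List Char) line =>
        let fields := (st.2 ++ line).splitOn '|'
        (st.1 ++ [fields.dropLast.map String.ofList], fields.getLastD []))
      (acc, carry)).1 = acc ++ pvBexec lines [] carry := by
  induction lines with
  | nil => intro acc carry; simp [pvBexec]
  | cons line rest ih =>
    intro acc carry
    simp only [List.foldl_cons, pvBexec, List.nil_append]
    rw [ih]
    simp

-- ===== VERDICT (by name: the statement is the Claim_ definition above) =====
theorem stringToCSVList_spec : Claim_equal_stringToCSVList := by
  intro s _
  unfold Spec_stringToCSVList stringToCSVList stringToCSVList_alt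
  have h := pvMain s.toList "" [[]] (by simp) (by simp)
  simp only [List.length_cons, List.length_nil, Nat.add_sub_cancel] at h
  rw [h, pvAltFold]
  simp
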